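-- pv_equiv track=rewrite | github.com/UMBC-CMSC-Hamilton/cmsc201spring2024 | recursion_day_2.py | matching_parens
-- ===== SOURCE A (Python) =====
-- def matching_parens(a_string, difference):
--     if not a_string:  # if len(a_string) == 0: or if a_string == "":
--         return difference
--     if difference < 0:
--         return -1
--
--     if a_string[0] == '(':
--         return matching_parens(a_string[1:], difference + 1)
--     elif a_string[0] == ')':
--         return matching_parens(a_string[1:], difference - 1)
--     else:
--         return matching_parens(a_string[1:], difference)
-- ===== SOURCE B (Python) =====
-- def matching_parens(a_string, difference):
--     # One full linear pass: track the running balance and the minimum balance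
--     # seen before each character; decide -1 vs final balance once at the end.
--     if not a_string:
--         return difference
--     bal = difference
--     low = difference
--     for ch in a_string:
--         low = min(low, bal)
--         bal += 1 if ch == '(' else -1 if ch == ')' else 0
--     return -1 if low < 0 else bal
-- ===== Notes on version B (the rewrite author's own statement) =====
-- stated objective: faster
-- what changed: Replaced A's recursion that slices the string on every call and returns -1 at the first negative balance by a single linear pass computing the final balance and the minimum prefix balance, deciding -1 vs balance once at the end.
import Mathlib
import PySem

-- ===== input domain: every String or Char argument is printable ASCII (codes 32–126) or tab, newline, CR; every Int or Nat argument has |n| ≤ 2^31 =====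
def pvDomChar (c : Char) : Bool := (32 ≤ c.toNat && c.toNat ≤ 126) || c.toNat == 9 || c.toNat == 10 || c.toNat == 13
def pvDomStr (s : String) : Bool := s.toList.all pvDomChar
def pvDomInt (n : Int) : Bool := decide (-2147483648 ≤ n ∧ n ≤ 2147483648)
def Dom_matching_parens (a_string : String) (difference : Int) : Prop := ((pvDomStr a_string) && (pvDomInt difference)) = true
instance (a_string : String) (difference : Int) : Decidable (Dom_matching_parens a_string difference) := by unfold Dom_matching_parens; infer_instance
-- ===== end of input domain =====

-- B replaces A's O(n^2) slice-per-call recursion by one linear pass that tracks the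
-- running balance and the minimum balance seen before each character (objective: faster).


-- ===== PORT A =====
-- A's recursion: empty → difference; difference < 0 → -1; else recurse on the tail
-- (a_string[1:] = the tail of the char list) with the adjusted difference.
def matchingParensA : List Char → Int → Int
  | [], difference => difference
  | c :: rest, difference =>
    if difference < 0 then -1
    else if c = '(' then matchingParensA rest (difference + 1)
    else if c = ')' then matchingParensA rest (difference - 1)
    else matchingParensA rest difference

def matching_parens (a_string : String) (difference : Int) : Int :=
  matchingParensA a_string.toList difference

-- ===== PORT B =====
-- B's single loop body: low = min(low, bal); bal += delta(ch).
def mpFold : List Char → Int × Int → Int × Int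
  | [], st => st
  | c :: rest, (bal, low) =>
      mpFold rest (bal + (if c = '(' then 1 else if c = ')' then -1 else 0), min low bal)

def matching_parens_alt (a_string : String) (difference : Int) : Int :=
  if a_string = "" then difference
  else
    let st := mpFold a_string.toList (difference, difference)
    if st.2 < 0 then -1 else st.1

-- ===== PRECONDITION & SPEC =====
def Spec_matching_parens (a_string : String) (difference : Int) (out : Int) : Prop := out = matching_parens_alt a_string difference
instance (a_string : String) (difference : Int) (out : Int) : Decidable (Spec_matching_parens a_string difference out) := by unfold Spec_matching_parens; infer_instance

-- ===== CLAIM (what is proved, stated in full; the proofs are below) =====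
def Claim_equal_matching_parens : Prop := ∀ (a_string : String) (difference : Int), Dom_matching_parens a_string difference → Spec_matching_parens a_string difference (matching_parens a_string difference)

-- ===== LEMMAS AND PROOFS =====

theorem mpFold_fst (l : List Char) : ∀ b lo lo', (mpFold l (b, lo)).1 = (mpFold l (b, lo')).1 := by
  induction l with
  | nil => intro b lo lo'; rfl
  | cons c rest ih => intro b lo lo'; simp only [mpFold]; exact ih _ _ _

theorem mpFold_snd (l : List Char) (hne : l ≠ []) :
    ∀ b lo, (mpFold l (b, lo)).2 = min lo (mpFold l (b, b)).2 := by
  induction l with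
  | nil => exact absurd rfl hne
  | cons c rest ih =>
    intro b lo
    by_cases hr : rest = []
    · subst hr; simp [mpFold]
    · simp only [mpFold, min_self]
      rw [ih hr, ih hr _ b]
      omega

theorem mpFold_key (rest : List Char) (hr : rest ≠ []) (d b' : Int)
    (hA : matchingParensA rest b' = if (mpFold rest (b', b')).2 < 0 then -1 else (mpFold rest (b', b')).1) :
    (if d < 0 then (-1 : Int) else matchingParensA rest b')
      = if (mpFold rest (b', d)).2 < 0 then -1 else (mpFold rest (b', d)).1 := by
  have h2 := mpFold_snd rest hr b' d
  have h1 := mpFold_fst rest b' d b'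
  rw [hA, h1]
  split_ifs <;> omega

theorem matchingA_eq (l : List Char) (hne : l ≠ []) (d : Int) :
    matchingParensA l d =
      if (mpFold l (d, d)).2 < 0 then -1 else (mpFold l (d, d)).1 := by
  induction l generalizing d with
  | nil => exact absurd rfl hne
  | cons c rest ih =>
    by_cases hr : rest = []
    · subst hr
      simp only [matchingParensA, mpFold, min_self]
      split_ifs <;> simp_all <;> omega
    · by_cases hc1 : c = '('
      · have hstep : mpFold (c :: rest) (d, d) = mpFold rest (d + 1, d) := by
          simp [mpFold, hc1]
        have hA : matchingParensA (c :: rest) d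
            = if d < 0 then -1 else matchingParensA rest (d + 1) := by
          simp [matchingParensA, hc1]
        rw [hstep, hA]
        exact mpFold_key rest hr d (d + 1) (ih hr (d + 1))
      · by_cases hc2 : c = ')'
        · have hstep : mpFold (c :: rest) (d, d) = mpFold rest (d - 1, d) := by
            simp [mpFold, hc2]
            ring_nf
          have hA : matchingParensA (c :: rest) d
              = if d < 0 then -1 else matchingParensA rest (d - 1) := by
            simp [matchingParensA, hc2]
          rw [hstep, hA]
          exact mpFold_key rest hr d (d - 1) (ih hr (d - 1))
        · have hstep : mpFold (c :: rest) (d, d) = mpFold rest (d, d) := by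
            simp [mpFold, hc1, hc2]
          have hA : matchingParensA (c :: rest) d
              = if d < 0 then -1 else matchingParensA rest d := by
            simp [matchingParensA, hc1, hc2]
          rw [hstep, hA]
          exact mpFold_key rest hr d d (ih hr d)

-- ===== VERDICT (by name: the statement is the Claim_ definition above) =====
theorem matching_parens_spec : Claim_equal_matching_parens := by
  intro s d _
  unfold Spec_matching_parens matching_parens matching_parens_alt
  by_cases hs : s = ""
  · subst hs; simp [matchingParensA]
  · have hne : s.toList ≠ [] := by
      intro h
      exact hs (by
        have := congrArg String.ofList h
        simpa using this)
    simp only [if_neg hs]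
    exact matchingA_eq s.toList hne d
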